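-- pv_equiv track=rewrite | github.com/CompNet/LREC2024_renard | renard_lrec2024/network_extraction.py | split_thg_into_sentence
-- ===== SOURCE A (Python) =====
-- from typing import Dict, Tuple, List, Set, Optional, Any
--
-- def split_thg_into_sentence(tokens: List[str]) -> List[List[str]]:
--     sentences = []
--     current_sentence = []
--     in_quote = False
--
--     for token in tokens:
--         current_sentence.append(token)
--         if not in_quote and token in [".", "?", "!"]:
--             sentences.append(current_sentence)
--             current_sentence = []
--         if token == '"':
--             in_quote = not in_quote
--
--     if not len(current_sentence) == 0:
--         sentences.append(current_sentence)
--
--     return sentences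
-- ===== SOURCE B (Python) =====
-- from typing import List, Optional, Tuple
--
--
-- def _find_cut(rest: List[str], even: bool) -> Optional[Tuple[int, bool]]:
--     """Index of the first sentence terminator outside quotes, with the
--     quote parity at that position; None if there is no such terminator."""
--     e = even
--     for i, t in enumerate(rest):
--         if e and t in (".", "?", "!"):
--             return i, e
--         if t == '"':
--             e = not e
--     return None
--
--
-- def split_thg_into_sentence(tokens: List[str]) -> List[List[str]]:
--     sentences = []
--     rest = tokens
--     even = True
--     while rest:
--         cut = _find_cut(rest, even)
--         if cut is None:
--             sentences.append(rest)
--             break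
--         i, e = cut
--         sentences.append(rest[: i + 1])
--         even = e  # rest[i] is a terminator, never '"', so parity is unchanged
--         rest = rest[i + 1 :]
--     return sentences
-- ===== Notes on version B (the rewrite author's own statement) =====
-- stated objective: alternative
-- what changed: A builds sentences token by token in one accumulator pass; B repeatedly scans for the next sentence terminator outside quotes and slices that whole sentence off the front of the remaining token list.
import Mathlib
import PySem

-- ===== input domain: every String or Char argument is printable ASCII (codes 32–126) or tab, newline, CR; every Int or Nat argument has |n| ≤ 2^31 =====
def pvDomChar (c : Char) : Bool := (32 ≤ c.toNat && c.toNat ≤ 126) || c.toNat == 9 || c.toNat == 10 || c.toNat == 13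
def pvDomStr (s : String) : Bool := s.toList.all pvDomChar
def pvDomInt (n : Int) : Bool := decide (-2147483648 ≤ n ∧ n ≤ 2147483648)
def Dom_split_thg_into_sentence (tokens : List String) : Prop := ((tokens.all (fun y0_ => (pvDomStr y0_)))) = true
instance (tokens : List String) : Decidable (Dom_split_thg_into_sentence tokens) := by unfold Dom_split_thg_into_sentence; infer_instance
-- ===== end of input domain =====

-- B replaces A's single-pass sentence accumulator by repeatedly finding the next
-- sentence terminator outside quotes and slicing that sentence off the front (objective: alternative).


-- ===== PORT A =====
-- one loop iteration of A: append the token, cut the sentence when a terminator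
-- is seen outside quotes, then toggle the quote flag
def pvAStep (st : List (List String) × List String × Bool) (token : String) :
    List (List String) × List String × Bool :=
  let sentences := st.1
  let current := st.2.1 ++ [token]
  let inq := st.2.2
  let p :=
    if !inq && ([".", "?", "!"].contains token) then (sentences ++ [current], ([] : List String))
    else (sentences, current)
  (p.1, p.2, if token == "\"" then !inq else inq)

def split_thg_into_sentence (tokens : List String) : List (List String) :=
  let st := tokens.foldl pvAStep (([] : List (List String)), ([] : List String), false)
  if st.2.1.length == 0 then st.1 else st.1 ++ [st.2.1]

-- ===== PORT B =====
def pvIsEnd (t : String) : Bool := t == "." || t == "?" || t == "!"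

-- `_find_cut` of Source B: index of the first terminator outside quotes and the
-- parity there (the enumerate counter becomes the `+1` on the recursive result)
def pvFindCut (e : Bool) : List String → Option (Nat × Bool)
  | [] => none
  | t :: rest =>
    if e && pvIsEnd t then some (0, e)
    else
      match pvFindCut (if t == "\"" then !e else e) rest with
      | none => none
      | some (i, e') => some (i + 1, e')

-- the while-loop of Source B; rest[:i+1] / rest[i+1:] are List.take / List.drop
-- (exact here: the index is a nonnegative in-range Nat)
def pvAltLoop : List (List String) → Bool → List String → List (List String)
  | sentences, _, [] => sentences
  | sentences, even, t :: ts =>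
    match pvFindCut even (t :: ts) with
    | none => sentences ++ [t :: ts]
    | some (i, e) =>
      pvAltLoop (sentences ++ [(t :: ts).take (i + 1)]) e ((t :: ts).drop (i + 1))
termination_by _ _ rest => rest.length
decreasing_by simp

def split_thg_into_sentence_alt (tokens : List String) : List (List String) :=
  pvAltLoop [] true tokens

-- ===== PRECONDITION & SPEC =====
def Spec_split_thg_into_sentence (tokens : List String) (out : List (List String)) : Prop := out = split_thg_into_sentence_alt tokens
instance (tokens : List String) (out : List (List String)) : Decidable (Spec_split_thg_into_sentence tokens out) := by unfold Spec_split_thg_into_sentence; infer_instance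

-- ===== CLAIM (what is proved, stated in full; the proofs are below) =====
def Claim_equal_split_thg_into_sentence : Prop := ∀ (tokens : List String), Dom_split_thg_into_sentence tokens → Spec_split_thg_into_sentence tokens (split_thg_into_sentence tokens)

-- ===== LEMMAS AND PROOFS =====

-- reference: sentence segmentation with an explicit current sentence and
-- "outside quotes" flag e (e = ¬ in_quote)
def refSeg (cur : List String) (e : Bool) : List String → List (List String)
  | [] => if cur.isEmpty then [] else [cur]
  | t :: rest =>
    if e && pvIsEnd t then (cur ++ [t]) :: refSeg [] (if t == "\"" then !e else e) rest
    else refSeg (cur ++ [t]) (if t == "\"" then !e else e) rest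

theorem contains_end (t : String) : ([".", "?", "!"].contains t) = pvIsEnd t := by
  by_cases h1 : t = "." <;> by_cases h2 : t = "?" <;> by_cases h3 : t = "!" <;>
    simp [pvIsEnd, h1, h2, h3]

theorem end_not_quote {t : String} (h : pvIsEnd t = true) : (t == "\"") = false := by
  simp only [pvIsEnd, Bool.or_eq_true, beq_iff_eq] at h
  rcases h with (h | h) | h <;> subst h <;> decide

theorem keyA : ∀ (rest : List String) (sents : List (List String)) (cur : List String) (inq : Bool),
    (let st := List.foldl pvAStep (sents, cur, inq) rest;
     if st.2.1.length == 0 then st.1 else st.1 ++ [st.2.1]) = sents ++ refSeg cur (!inq) rest := by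
  intro rest
  induction rest with
  | nil =>
    intro sents cur inq
    simp [refSeg]
    cases cur <;> simp
  | cons t ts ih =>
    intro sents cur inq
    simp only [List.foldl_cons]
    by_cases hcut : (!inq && pvIsEnd t) = true
    · have hend : pvIsEnd t = true := (Bool.and_eq_true _ _ |>.mp hcut).2
      have hq := end_not_quote hend
      simp only [pvAStep, contains_end, if_pos hcut]
      rw [ih]
      simp [refSeg, hcut, hq]
    · simp only [pvAStep, contains_end, if_neg hcut]
      rw [ih]
      cases hq : (t == "\"") <;> simp [refSeg, hcut, hq]

theorem findCut_none : ∀ (rest : List String) (e : Bool), pvFindCut e rest = none →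
    ∀ cur : List String, refSeg cur e rest = if (cur ++ rest).isEmpty then [] else [cur ++ rest] := by
  intro rest
  induction rest with
  | nil => intro e _ cur; simp [refSeg]
  | cons t ts ih =>
    intro e h cur
    simp only [pvFindCut] at h
    by_cases hc : (e && pvIsEnd t) = true
    · simp [hc] at h
    · simp only [if_neg hc] at h
      cases hrec : pvFindCut (if t == "\"" then !e else e) ts with
      | none =>
        simp only [refSeg, if_neg hc]
        rw [ih _ hrec]
        simp
      | some p => rw [hrec] at h; simp at h

theorem findCut_some : ∀ (rest : List String) (e : Bool) (i : Nat) (e' : Bool),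
    pvFindCut e rest = some (i, e') → ∀ cur : List String,
    refSeg cur e rest = (cur ++ rest.take (i + 1)) :: refSeg [] e' (rest.drop (i + 1)) := by
  intro rest
  induction rest with
  | nil => intro e i e' h; simp [pvFindCut] at h
  | cons t ts ih =>
    intro e i e' h cur
    simp only [pvFindCut] at h
    by_cases hc : (e && pvIsEnd t) = true
    · simp only [if_pos hc] at h
      simp only [Option.some.injEq, Prod.mk.injEq] at h
      obtain ⟨hi, he⟩ := h
      subst he
      cases hi
      have hq : (t == "\"") = false := end_not_quote (Bool.and_eq_true _ _ |>.mp hc).2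
      simp [refSeg, hc, hq]
    · simp only [if_neg hc] at h
      cases hrec : pvFindCut (if t == "\"" then !e else e) ts with
      | none => rw [hrec] at h; simp at h
      | some p =>
        rw [hrec] at h
        obtain ⟨i0, e0⟩ := p
        simp only [Option.some.injEq, Prod.mk.injEq] at h
        obtain ⟨hi, he⟩ := h
        subst he
        subst hi
        simp only [refSeg, if_neg hc]
        rw [ih _ _ _ hrec]
        simp

theorem altLoop_eq_aux : ∀ (n : Nat) (rest : List String), rest.length ≤ n →
    ∀ (sents : List (List String)) (e : Bool),
      pvAltLoop sents e rest = sents ++ refSeg [] e rest := by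
  intro n
  induction n with
  | zero =>
    intro rest h sents e
    have hnil : rest = [] := by cases rest <;> simp_all
    subst hnil
    simp [pvAltLoop, refSeg]
  | succ n ih =>
    intro rest h sents e
    cases rest with
    | nil => simp [pvAltLoop, refSeg]
    | cons t ts =>
      simp only [pvAltLoop]
      cases hf : pvFindCut e (t :: ts) with
      | none =>
        rw [findCut_none _ _ hf]
        simp
      | some p =>
        obtain ⟨i, e'⟩ := p
        show pvAltLoop (sents ++ [(t :: ts).take (i + 1)]) e' ((t :: ts).drop (i + 1)) =
          sents ++ refSeg [] e (t :: ts)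
        rw [findCut_some _ _ _ _ hf]
        rw [ih _ (by simp at h ⊢; omega)]
        simp

-- ===== VERDICT (by name: the statement is the Claim_ definition above) =====
theorem split_thg_into_sentence_spec : Claim_equal_split_thg_into_sentence := by
  intro tokens _
  unfold Spec_split_thg_into_sentence split_thg_into_sentence split_thg_into_sentence_alt
  rw [altLoop_eq_aux tokens.length tokens le_rfl]
  simpa using keyA tokens [] [] false
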